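-- pv_equiv track=rewrite | github.com/dmitry-pechersky/algorithms | uva online judge/00467 - Synching Signals.py | synching_signal
-- ===== SOURCE A (Python) =====
-- def synching_signal(signals):
--     min_signal = min(signals)
--     for time in range(min_signal * 2, 3601):
--         is_sync = True
--         for signal in signals:
--             if time % (signal * 2) >= (signal - 5):
--                 is_sync = False
--                 break
--         if is_sync:
--             return time
--     return None
-- ===== SOURCE B (Python) =====
-- def synching_signal(signals):
--     lo, hi = min(signals) * 2, 3601
--     while lo < hi:
--         chunk = range(lo, min(lo + 4096, hi))
--         for sig in signals:
--             if not chunk: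
--                 break
--             chunk = [t for t in chunk if t % (sig * 2) < sig - 5]
--         if chunk:
--             return chunk[0]
--         lo += 4096
--     return None
-- ===== Notes on version B (the rewrite author's own statement) =====
-- stated objective: alternative
-- what changed: B inverts the loop nesting: it walks the candidate time range in chunks and filters each chunk per signal (successive intersection with each signal's green times), returning the first surviving time, instead of A's scan over single times with an inner early-exit loop over the signals.
-- outside the precondition, e.g. on synching_signal([1, 0]): A returns None, B returns None; on synching_signal([0]): A raises ZeroDivisionError, B raises ZeroDivisionError
import Mathlib
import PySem

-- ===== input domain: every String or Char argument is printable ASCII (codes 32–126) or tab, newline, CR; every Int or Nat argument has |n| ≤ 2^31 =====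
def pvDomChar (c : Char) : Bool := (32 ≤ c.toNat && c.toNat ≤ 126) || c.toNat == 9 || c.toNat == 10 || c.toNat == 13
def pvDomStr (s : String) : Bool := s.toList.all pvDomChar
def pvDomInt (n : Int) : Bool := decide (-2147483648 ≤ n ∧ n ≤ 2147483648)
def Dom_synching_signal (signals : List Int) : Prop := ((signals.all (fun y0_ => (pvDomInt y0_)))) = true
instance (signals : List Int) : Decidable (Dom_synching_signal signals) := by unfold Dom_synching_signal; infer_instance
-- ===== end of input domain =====

-- B inverts the loop nesting: it walks the candidate time range in chunks and, per
-- signal, filters each chunk down to the times at which that signal is green,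
-- returning the first survivor (alternative decomposition, similar cost).


-- ===== PORT A =====
def synching_signal (signals : List Int) : Option Int :=
  match PySem.List.min? signals (fun x => x) with
  | none => none
  | some min_signal =>
    (PySem.List.pyRange (min_signal * 2) 3601 1).find? (fun time =>
      signals.all (fun signal => decide (PySem.Int.mod time (signal * 2) < signal - 5)))

-- ===== PORT B =====
-- Source B's while loop over chunk starts becomes recursion on lo with measure (hi - lo).toNat
def pvChunkLoop (signals : List Int) (lo hi : Int) : Option Int :=
  if h : lo < hi then
    let chunk := signals.foldl
      (fun chunk sig =>
        if chunk.isEmpty then chunk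
        else chunk.filter (fun t => decide (PySem.Int.mod t (sig * 2) < sig - 5)))
      (PySem.List.pyRange lo (min (lo + 4096) hi) 1)
    if chunk.isEmpty then pvChunkLoop signals (lo + 4096) hi
    else PySem.List.pyGet? chunk 0
  else none
termination_by (hi - lo).toNat
decreasing_by omega

def synching_signal_alt (signals : List Int) : Option Int :=
  match PySem.List.min? signals (fun x => x) with
  | none => none
  | some min_signal => pvChunkLoop signals (min_signal * 2) 3601

-- ===== PRECONDITION & SPEC =====
-- Pre_ excludes the empty list (min() raises ValueError in A and B) and lists containing 0,
-- on which both A and B can raise ZeroDivisionError once the scan reaches the zero signal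
-- (on some such lists an earlier signal always fails first and both return None; see cites).
def Pre_synching_signal (signals : List Int) : Prop :=
  signals ≠ [] ∧ (0 : Int) ∉ signals
instance (signals : List Int) : Decidable (Pre_synching_signal signals) := by
  unfold Pre_synching_signal; infer_instance

def pvWitness_synching_signal : List Int := [51, 70]

def Spec_synching_signal (signals : List Int) (out : Option Int) : Prop := out = synching_signal_alt signals
instance (signals : List Int) (out : Option Int) : Decidable (Spec_synching_signal signals out) := by unfold Spec_synching_signal; infer_instance

-- ===== CLAIM (what is proved, stated in full; the proofs are below) =====
def Claim_equal_synching_signal : Prop := ∀ (signals : List Int), Dom_synching_signal signals → Pre_synching_signal signals → Spec_synching_signal signals (synching_signal signals)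

-- ===== LEMMAS AND PROOFS =====

-- the per-signal "green" predicate both programs test
def pvGreen (signal t : Int) : Bool := decide (PySem.Int.mod t (signal * 2) < signal - 5)

theorem pvGreen_def (signal t : Int) :
    decide (PySem.Int.mod t (signal * 2) < signal - 5) = pvGreen signal t := rfl

-- the early-empty break is sound: the guarded fold is the plain fold of filters
theorem pvFoldGuard (l : List Int) (R : List Int) :
    l.foldl (fun chunk sig => if chunk.isEmpty then chunk else chunk.filter (pvGreen sig)) R
      = l.foldl (fun chunk sig => chunk.filter (pvGreen sig)) R := by
  induction l generalizing R with
  | nil => rfl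
  | cons s l ih =>
    rw [List.foldl_cons, List.foldl_cons]
    cases R with
    | nil => simpa using ih []
    | cons x xs => simpa using ih ((x :: xs).filter (pvGreen s))

-- successive per-signal filtering is one filter by the conjunction of all predicates
theorem pvFoldFilter (l : List Int) (R : List Int) :
    l.foldl (fun chunk sig => chunk.filter (pvGreen sig)) R
      = R.filter (fun t => l.all (fun s => pvGreen s t)) := by
  induction l generalizing R with
  | nil => simp
  | cons s l ih =>
    rw [List.foldl_cons, ih, List.filter_filter]
    apply List.filter_congr
    intro t _
    simp [Bool.and_comm]

-- the chunk loop returns the first time in [lo, hi) that is green for every signal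
theorem pvChunkLoop_eq (signals : List Int) (lo hi : Int) :
    pvChunkLoop signals lo hi
      = ((PySem.List.pyRange lo hi 1).filter
          (fun t => signals.all (fun s => pvGreen s t))).head? := by
  rw [pvChunkLoop]
  split
  · rename_i h
    simp only [pvGreen_def, pvFoldGuard, pvFoldFilter]
    have hsplit : PySem.List.pyRange lo hi 1
        = PySem.List.pyRange lo (min (lo + 4096) hi) 1
          ++ PySem.List.pyRange (min (lo + 4096) hi) hi 1 :=
      PySem.List.pyRange_one_append lo (min (lo + 4096) hi) hi (by omega) (by omega)
    rw [hsplit, List.filter_append, List.head?_append]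
    set C := (PySem.List.pyRange lo (min (lo + 4096) hi) 1).filter
      (fun t => signals.all (fun s => pvGreen s t)) with hCdef
    cases hC : C with
    | nil =>
      simp only [List.isEmpty_nil, if_true, List.head?_nil, Option.none_or]
      rw [pvChunkLoop_eq signals (lo + 4096) hi]
      by_cases hle : lo + 4096 ≤ hi
      · rw [min_eq_left hle]
      · rw [min_eq_right (by omega)]
        rw [PySem.List.pyRange_one_eq_nil (a := lo + 4096) (by omega),
            PySem.List.pyRange_one_eq_nil (a := hi) (by omega)]
    | cons c cs =>
      simp [PySem.List.pyGet?, PySem.List.pyIdx?]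
  · rename_i h
    rw [PySem.List.pyRange_one_eq_nil (by omega)]
    rfl
termination_by (hi - lo).toNat
decreasing_by omega

-- ===== VERDICT (by name: the statement is the Claim_ definition above) =====
theorem synching_signal_spec : Claim_equal_synching_signal := by
  intro signals _ hpre
  unfold Spec_synching_signal synching_signal synching_signal_alt
  cases hmin : PySem.List.min? signals (fun x => x) with
  | none => exact absurd ((PySem.List.min?_eq_none_iff _ _).mp hmin) hpre.1
  | some m =>
    simp only [pvGreen_def, pvChunkLoop_eq]
    exact Eq.symm List.head?_filter
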